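-- pv_equiv track=rewrite | github.com/RomVargas/algoritmosJPN | Python/best_seat.py | bestSeat
-- ===== SOURCE A (Python) =====
-- def bestSeat(seats):
--     # Write your code here.
--     bestSeat = -1
--     maxSpace = 0
--
--     left = 0
--     while left < len(seats):
--         right = left + 1
--         while right < len(seats) and seats[right] == 0:
--             right += 1
--
--         availableSpace = right - left - 1
--         if availableSpace > maxSpace:
--             bestSeat = (left + right) // 2
--             maxSpace = availableSpace
--         left = right
--
--     return bestSeat
-- ===== SOURCE B (Python) =====
-- def bestSeat(seats):
--     n = len(seats)
--     # Stage 1: run-length encode positions 1..n-1 into maximal zero-runs (start, length).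
--     runs = []
--     run = 0
--     for i in range(1, n):
--         if seats[i] == 0:
--             run += 1
--         else:
--             if run:
--                 runs.append((i - run, run))
--             run = 0
--     if run:
--         runs.append((n - run, run))
--     # Stage 2: the best seat is the midpoint of the first longest run.
--     if not runs:
--         return -1
--     s, L = min(runs, key=lambda t: -t[1])
--     return s + (L - 1) // 2
-- ===== Notes on version B (the rewrite author's own statement) =====
-- stated objective: alternative
-- what changed: Replaced A's online nested-while max-tracking over seat boundaries by a staged pipeline: run-length encode the zero-runs into an explicit (start, length) list, then select the first longest run with min(key=-length) and compute its midpoint arithmetically as start + (length-1)//2.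
import Mathlib
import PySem

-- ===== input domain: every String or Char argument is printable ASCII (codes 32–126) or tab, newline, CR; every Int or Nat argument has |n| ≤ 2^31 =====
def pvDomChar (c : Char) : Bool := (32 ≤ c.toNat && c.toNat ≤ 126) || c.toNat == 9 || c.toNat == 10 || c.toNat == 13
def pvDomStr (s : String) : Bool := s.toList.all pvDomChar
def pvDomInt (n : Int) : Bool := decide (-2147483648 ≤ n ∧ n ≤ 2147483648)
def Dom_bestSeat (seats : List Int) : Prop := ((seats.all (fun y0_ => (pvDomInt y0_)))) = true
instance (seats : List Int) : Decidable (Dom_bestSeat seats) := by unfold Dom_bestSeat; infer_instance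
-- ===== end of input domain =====

-- B replaces A's online nested-while max-tracking by a staged pipeline: run-length encode the
-- zero-runs into an explicit (start, length) list, then pick the first longest run with min(key=-len)
-- and compute its midpoint arithmetically; same O(n) cost, a genuinely different decomposition.

-- ===== PORT A =====
-- inner while: advance right while right < len and seats[right] == 0 (fuel is only a totality guard;
-- fuel = seats.length always suffices, since right stops at seats.length at the latest)
def bestSeatInner (seats : List Int) (right : Nat) (fuel : Nat) : Nat :=
  match fuel with
  | 0 => right
  | fuel + 1 =>
    if right < seats.length ∧ (PySem.List.pyGet? seats (right : Int)).getD 0 = 0 then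
      bestSeatInner seats (right + 1) fuel
    else right

-- outer while over left, carrying bestSeat and maxSpace (fuel is only a totality guard; left strictly
-- increases each iteration, so fuel = seats.length suffices)
def bestSeatLoop (seats : List Int) (left : Nat) (best maxSpace : Int) (fuel : Nat) : Int :=
  match fuel with
  | 0 => best
  | fuel + 1 =>
    if left < seats.length then
      let right := bestSeatInner seats (left + 1) seats.length
      let availableSpace : Int := (right : Int) - (left : Int) - 1
      if availableSpace > maxSpace then
        bestSeatLoop seats right (PySem.Int.floordiv ((left : Int) + (right : Int)) 2) availableSpace fuel
      else
        bestSeatLoop seats right best maxSpace fuel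
    else best

def bestSeat (seats : List Int) : Int := bestSeatLoop seats 0 (-1) 0 seats.length

-- ===== PORT B =====
-- one step of B's run-length-encoding loop; state = (runs so far, current zero-run length)
def bestSeatRLE (seats : List Int) (st : List (Int × Int) × Int) (i : Int) : List (Int × Int) × Int :=
  if (PySem.List.pyGet? seats i).getD 0 = 0 then (st.1, st.2 + 1)
  else if st.2 ≠ 0 then (st.1 ++ [(i - st.2, st.2)], 0)
  else (st.1, 0)

def bestSeat_alt (seats : List Int) : Int :=
  let n : Int := PySem.List.len seats
  let st := (PySem.List.pyRange 1 n 1).foldl (bestSeatRLE seats) ([], 0)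
  let runs := if st.2 ≠ 0 then st.1 ++ [(n - st.2, st.2)] else st.1
  match PySem.List.min? runs (fun t => -t.2) with
  | none => -1
  | some (s, L) => s + PySem.Int.floordiv (L - 1) 2

-- ===== PRECONDITION & SPEC =====
def Spec_bestSeat (seats : List Int) (out : Int) : Prop := out = bestSeat_alt seats
instance (seats : List Int) (out : Int) : Decidable (Spec_bestSeat seats out) := by unfold Spec_bestSeat; infer_instance

-- ===== CLAIM (what is proved, stated in full; the proofs are below) =====
def Claim_equal_bestSeat : Prop := ∀ (seats : List Int), Dom_bestSeat seats → Spec_bestSeat seats (bestSeat seats)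

-- ===== LEMMAS AND PROOFS =====

-- B's midpoint formula
def midOf (s L : Int) : Int := s + PySem.Int.floordiv (L - 1) 2

-- ghost: the zero-runs of seats starting from boundary position `left`
def runsG (seats : List Int) (left : Nat) (fuel : Nat) : List (Int × Int) :=
  match fuel with
  | 0 => []
  | fuel + 1 =>
    if left < seats.length then
      (if bestSeatInner seats (left + 1) seats.length - left - 1 ≠ 0 then
        [(((left + 1 : Nat) : Int),
          ((bestSeatInner seats (left + 1) seats.length - left - 1 : Nat) : Int))] else [])
        ++ runsG seats (bestSeatInner seats (left + 1) seats.length) fuel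
    else []

-- A's max-tracking step, phrased over runs
def stepR (st : Int × Int) (p : Int × Int) : Int × Int :=
  if p.2 > st.2 then (midOf p.1 p.2, p.2) else st

theorem bestSeatInner_ge (seats : List Int) (r fuel : Nat) : r ≤ bestSeatInner seats r fuel := by
  induction fuel generalizing r with
  | zero => exact le_refl _
  | succ fuel ih =>
    rw [bestSeatInner]
    split
    · exact le_trans (Nat.le_succ _) (ih (r + 1))
    · exact le_refl _

theorem bestSeatInner_le (seats : List Int) (r fuel : Nat) (hr : r ≤ seats.length) :
    bestSeatInner seats r fuel ≤ seats.length := by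
  induction fuel generalizing r with
  | zero => exact hr
  | succ fuel ih =>
    rw [bestSeatInner]
    split
    · next h => exact ih (r + 1) (by omega)
    · exact hr

-- fuel irrelevance for the inner scan
theorem bestSeatInner_fuel (seats : List Int) (f1 f2 r : Nat)
    (h1 : seats.length - r ≤ f1) (h2 : seats.length - r ≤ f2) :
    bestSeatInner seats r f1 = bestSeatInner seats r f2 := by
  induction f1 generalizing r f2 with
  | zero =>
    cases f2 with
    | zero => rfl
    | succ f2 =>
      rw [bestSeatInner, bestSeatInner]
      rw [if_neg (fun h => absurd h.1 (by omega))]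
  | succ f1 ih =>
    cases f2 with
    | zero =>
      rw [bestSeatInner, bestSeatInner]
      rw [if_neg (fun h => absurd h.1 (by omega))]
    | succ f2 =>
      rw [bestSeatInner, bestSeatInner]
      split
      · next h => exact ih f2 (r + 1) (by omega) (by omega)
      · rfl

-- ghost fuel irrelevance
theorem runsG_fuel (seats : List Int) (f1 f2 left : Nat)
    (h1 : seats.length - left ≤ f1) (h2 : seats.length - left ≤ f2) :
    runsG seats left f1 = runsG seats left f2 := by
  induction f1 generalizing left f2 with
  | zero =>
    cases f2 with
    | zero => rfl
    | succ f2 =>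
      rw [runsG, runsG]
      rw [if_neg (by omega)]
  | succ f1 ih =>
    cases f2 with
    | zero =>
      rw [runsG, runsG]
      rw [if_neg (by omega)]
    | succ f2 =>
      rw [runsG, runsG]
      split
      · next h =>
        have hge := bestSeatInner_ge seats (left + 1) seats.length
        have hle := bestSeatInner_le seats (left + 1) seats.length h
        congr 1
        exact ih f2 (bestSeatInner seats (left + 1) seats.length) (by omega) (by omega)
      · rfl

-- every run in runsG has start ≥ 1 and length ≥ 1
theorem runsG_pos (seats : List Int) (fuel : Nat) :
    ∀ left, ∀ p ∈ runsG seats left fuel, 1 ≤ p.1 ∧ 1 ≤ p.2 := by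
  induction fuel with
  | zero => intro left p hp; simp [runsG] at hp
  | succ fuel ih =>
    intro left p hp
    rw [runsG] at hp
    split at hp
    · next h =>
      rcases List.mem_append.mp hp with hp | hp
      · split at hp
        · next hg =>
          rcases List.mem_singleton.mp hp with rfl
          exact ⟨by omega, by omega⟩
        · simp at hp
      · exact ih _ p hp
    · simp at hp

-- A's loop equals the stepR fold over the ghost run list
theorem loopA_eq_fold (seats : List Int) :
    ∀ (fuel left : Nat), seats.length - left ≤ fuel → left ≤ seats.length →
    ∀ best m : Int, 0 ≤ m →
    bestSeatLoop seats left best m fuel = ((runsG seats left fuel).foldl stepR (best, m)).1 := by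
  intro fuel
  induction fuel with
  | zero =>
    intro left hk hle best m hm
    rfl
  | succ fuel ih =>
    intro left hk hle best m hm
    rw [bestSeatLoop, runsG]
    by_cases hl : left < seats.length
    · rw [if_pos hl, if_pos hl]
      have hge := bestSeatInner_ge seats (left + 1) seats.length
      have hle' := bestSeatInner_le seats (left + 1) seats.length hl
      set right := bestSeatInner seats (left + 1) seats.length with hright
      by_cases hgap : ((right : Int) - (left : Int) - 1) > m
      · rw [if_pos hgap]
        have hne : right - left - 1 ≠ 0 := by omega
        rw [if_pos hne, List.cons_append, List.nil_append, List.foldl_cons]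
        have hstep : stepR (best, m) (((left + 1 : Nat) : Int), ((right - left - 1 : Nat) : Int)) =
            (PySem.Int.floordiv ((left : Int) + (right : Int)) 2, ((right - left - 1 : Nat) : Int)) := by
          unfold stepR
          rw [if_pos (by push_cast; omega)]
          have hmid : midOf ((left + 1 : Nat) : Int) ((right - left - 1 : Nat) : Int) =
              PySem.Int.floordiv ((left : Int) + (right : Int)) 2 := by
            unfold midOf PySem.Int.floordiv
            have h1 : (((right - left - 1 : Nat) : Int) - 1) = (right : Int) - (left : Int) - 2 := by
              omega
            rw [h1]
            rw [Int.fdiv_eq_ediv, Int.fdiv_eq_ediv]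
            rw [if_pos (Or.inl (by norm_num)), if_pos (Or.inl (by norm_num))]
            omega
          rw [hmid]
        rw [hstep]
        have hcast : ((right - left - 1 : Nat) : Int) = (right : Int) - (left : Int) - 1 := by
          omega
        rw [hcast]
        exact ih right (by omega) (by omega) _ _ (by omega)
      · rw [if_neg hgap]
        have hfold :
            (runsG seats right fuel).foldl stepR (best, m) =
            ((if right - left - 1 ≠ 0 then [(((left + 1 : Nat) : Int), ((right - left - 1 : Nat) : Int))] else [])
              ++ runsG seats right fuel).foldl stepR (best, m) := by
          by_cases hne : right - left - 1 ≠ 0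
          · rw [if_pos hne, List.cons_append, List.nil_append, List.foldl_cons]
            have : stepR (best, m) (((left + 1 : Nat) : Int), ((right - left - 1 : Nat) : Int)) = (best, m) := by
              unfold stepR
              rw [if_neg (by push_cast at hgap ⊢; omega)]
            rw [this]
          · rw [if_neg hne, List.nil_append]
        rw [← hfold]
        exact ih right (by omega) (by omega) _ _ hm
    · rw [if_neg hl, if_neg hl]
      rfl

-- min-with-key step of PySem.List.min?
def minStep (acc : Option (Int × Int)) (x : Int × Int) : Option (Int × Int) :=
  match acc with
  | none => some x
  | some q => if (-x.2 : Int) < -q.2 then some x else some q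

theorem min?_eq_foldl (runs : List (Int × Int)) :
    PySem.List.min? runs (fun t => -t.2) = runs.foldl minStep none := by
  unfold PySem.List.min?
  congr 1
  funext acc x
  cases acc with
  | none => rfl
  | some m => simp only [minStep]

-- the stepR fold from a seeded state computes the midpoint of the first longest run
theorem fold_stepR_eq_min (t : List (Int × Int)) :
    ∀ q : Int × Int, 1 ≤ q.2 → (∀ p ∈ t, 1 ≤ p.2) →
    (t.foldl stepR (midOf q.1 q.2, q.2)).1 =
      (match t.foldl minStep (some q) with
       | none => (-1 : Int)
       | some m => midOf m.1 m.2) := by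
  induction t with
  | nil => intro q hq ht; rfl
  | cons r t ih =>
    intro q hq ht
    rw [List.foldl_cons, List.foldl_cons]
    have hr : 1 ≤ r.2 := ht r (by simp)
    by_cases hcmp : r.2 > q.2
    · have h1 : stepR (midOf q.1 q.2, q.2) r = (midOf r.1 r.2, r.2) := by
        unfold stepR; rw [if_pos hcmp]
      have h2 : minStep (some q) r = some r := by
        simp only [minStep]
        rw [if_pos (by omega)]
      rw [h1, h2]
      exact ih r hr (fun p hp => ht p (by simp [hp]))
    · have h1 : stepR (midOf q.1 q.2, q.2) r = (midOf q.1 q.2, q.2) := by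
        unfold stepR; rw [if_neg hcmp]
      have h2 : minStep (some q) r = some q := by
        simp only [minStep]
        rw [if_neg (by omega)]
      rw [h1, h2]
      exact ih q hq (fun p hp => ht p (by simp [hp]))

-- B's RLE scan from index i with pending run counter equals the ghost run list
theorem rle_eq_runsG (seats : List Int) :
    ∀ (fuel i run : Nat) (acc : List (Int × Int)),
      i ≤ seats.length → seats.length - i ≤ fuel → run < i →
      (let st := (PySem.List.pyRange (i : Int) (seats.length : Int) 1).foldl (bestSeatRLE seats) (acc, (run : Int));
       if st.2 ≠ 0 then st.1 ++ [((seats.length : Int) - st.2, st.2)] else st.1) =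
      acc ++ ((if run + (bestSeatInner seats i seats.length - i) ≠ 0 then
                [(((i - run : Nat) : Int),
                  ((run + (bestSeatInner seats i seats.length - i) : Nat) : Int))] else [])
              ++ runsG seats (bestSeatInner seats i seats.length) seats.length) := by
  intro fuel
  induction fuel with
  | zero =>
    intro i run acc hle hf hri
    have hi : i = seats.length := by omega
    subst hi
    rw [PySem.List.pyRange_one_eq_nil (le_refl _)]
    simp only [List.foldl_nil]
    have hinner : bestSeatInner seats seats.length seats.length = seats.length := by
      cases hL : seats.length with
      | zero => omega
      | succ k =>
        rw [bestSeatInner]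
        rw [if_neg (fun h => absurd h.1 (by omega))]
    have hruns : runsG seats seats.length seats.length = [] := by
      cases hL : seats.length with
      | zero => rfl
      | succ k =>
        rw [runsG]
        rw [if_neg (by omega)]
    rw [hinner, hruns]
    simp only [Nat.sub_self, Nat.add_zero, List.append_nil]
    by_cases hrun : run = 0
    · subst hrun
      simp
    · rw [if_pos (show ((run : Int) ≠ 0) by exact_mod_cast hrun), if_pos hrun]
      have hc : (seats.length : Int) - (run : Int) = ((seats.length - run : Nat) : Int) := by omega
      rw [hc]
  | succ fuel ih =>
    intro i run acc hle hf hri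
    by_cases hi : i < seats.length
    · rw [PySem.List.pyRange_one_cons (by exact_mod_cast hi), List.foldl_cons]
      by_cases hzi : (PySem.List.pyGet? seats (i : Int)).getD 0 = 0
      · -- zero seat: the run grows
        have hstep : bestSeatRLE seats (acc, (run : Int)) (i : Int) = (acc, ((run + 1 : Nat) : Int)) := by
          rw [show bestSeatRLE seats (acc, (run : Int)) (i : Int) =
              (if (PySem.List.pyGet? seats (i : Int)).getD 0 = 0 then (acc, (run : Int) + 1)
               else if (run : Int) ≠ 0 then (acc ++ [((i : Int) - (run : Int), (run : Int))], 0)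
               else (acc, 0)) from rfl]
          rw [if_pos hzi]
          norm_num
        rw [hstep, show ((i : Int) + 1) = ((i + 1 : Nat) : Int) by push_cast; ring]
        have hinner : bestSeatInner seats (i + 1) seats.length = bestSeatInner seats i seats.length := by
          conv_rhs =>
            rw [show seats.length = ((seats.length - i - 1) + i) + 1 by omega]
          rw [bestSeatInner]
          rw [if_pos ⟨hi, hzi⟩]
          exact bestSeatInner_fuel seats seats.length ((seats.length - i - 1) + i) (i + 1) (by omega) (by omega)
        have hge1 : i + 1 ≤ bestSeatInner seats i seats.length := by
          rw [← hinner]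
          exact bestSeatInner_ge seats (i + 1) seats.length
        have hrec := ih (i + 1) (run + 1) acc (by omega) (by omega) (by omega)
        rw [hrec, hinner]
        rw [show run + 1 + (bestSeatInner seats i seats.length - (i + 1)) =
              run + (bestSeatInner seats i seats.length - i) from by omega]
        rw [show i + 1 - (run + 1) = i - run from by omega]
      · -- occupied seat: flush the run, i is a boundary
        have hstep : bestSeatRLE seats (acc, (run : Int)) (i : Int) =
            ((if run ≠ 0 then acc ++ [((i : Int) - run, (run : Int))] else acc), ((0 : Nat) : Int)) := by
          rw [show bestSeatRLE seats (acc, (run : Int)) (i : Int) =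
              (if (PySem.List.pyGet? seats (i : Int)).getD 0 = 0 then (acc, (run : Int) + 1)
               else if (run : Int) ≠ 0 then (acc ++ [((i : Int) - (run : Int), (run : Int))], 0)
               else (acc, 0)) from rfl]
          rw [if_neg hzi]
          by_cases hrun : run = 0
          · subst hrun
            rw [if_neg (by norm_num), if_neg (by norm_num)]
            norm_num
          · rw [if_pos (show ((run : Int) ≠ 0) by exact_mod_cast hrun), if_pos hrun]
            norm_num
        rw [hstep, show ((i : Int) + 1) = ((i + 1 : Nat) : Int) by push_cast; ring]
        have hrec := ih (i + 1) 0 (if run ≠ 0 then acc ++ [((i : Int) - (run : Nat), ((run : Nat) : Int))] else acc) (by omega) (by omega) (by omega)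
        rw [hrec]
        have hinner_i : bestSeatInner seats i seats.length = i := by
          cases hL : seats.length with
          | zero => omega
          | succ k =>
            rw [bestSeatInner]
            rw [if_neg (fun h => absurd h.2 hzi)]
        have hge1 := bestSeatInner_ge seats (i + 1) seats.length
        have hle1 := bestSeatInner_le seats (i + 1) seats.length (by omega)
        have hruns_i : runsG seats i seats.length =
            (if bestSeatInner seats (i + 1) seats.length - i - 1 ≠ 0 then
              [(((i + 1 : Nat) : Int),
                ((bestSeatInner seats (i + 1) seats.length - i - 1 : Nat) : Int))] else [])
              ++ runsG seats (bestSeatInner seats (i + 1) seats.length) seats.length := by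
          conv_lhs =>
            rw [show seats.length = ((seats.length - i - 1) + i) + 1 by omega]
          rw [runsG]
          rw [if_pos (by omega)]
          congr 1
          exact runsG_fuel seats ((seats.length - i - 1) + i) seats.length
            (bestSeatInner seats (i + 1) seats.length) (by omega) (by omega)
        rw [hinner_i, hruns_i]
        rw [show run + (i - i) = run from by omega]
        rw [show (0 : Nat) + (bestSeatInner seats (i + 1) seats.length - (i + 1)) =
              bestSeatInner seats (i + 1) seats.length - i - 1 from by omega]
        rw [show i + 1 - (0 : Nat) = i + 1 from by omega]
        by_cases hrun : run = 0
        · subst hrun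
          simp
        · rw [if_pos hrun, if_pos hrun]
          rw [show ((i : Int) - ((run : Nat) : Int)) = ((i - run : Nat) : Int) from by omega]
          simp [List.append_assoc]
    · have hi' : i = seats.length := by omega
      subst hi'
      rw [PySem.List.pyRange_one_eq_nil (le_refl _)]
      simp only [List.foldl_nil]
      have hinner : bestSeatInner seats seats.length seats.length = seats.length := by
        cases hL : seats.length with
        | zero => omega
        | succ k =>
          rw [bestSeatInner]
          rw [if_neg (fun h => absurd h.1 (by omega))]
      have hruns : runsG seats seats.length seats.length = [] := by
        cases hL : seats.length with
        | zero => rfl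
        | succ k =>
          rw [runsG]
          rw [if_neg (by omega)]
      rw [hinner, hruns]
      simp only [Nat.sub_self, Nat.add_zero, List.append_nil]
      by_cases hrun : run = 0
      · subst hrun
        simp
      · rw [if_pos (show ((run : Int) ≠ 0) by exact_mod_cast hrun), if_pos hrun]
        have hc : (seats.length : Int) - (run : Int) = ((seats.length - run : Nat) : Int) := by omega
        rw [hc]

-- ===== VERDICT (by name: the statement is the Claim_ definition above) =====
theorem bestSeat_spec : Claim_equal_bestSeat := by
  intro seats _
  show bestSeat seats = bestSeat_alt seats
  by_cases hn : seats.length = 0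
  · unfold bestSeat bestSeat_alt
    simp only [PySem.List.len_eq, hn, Nat.cast_zero]
    rw [PySem.List.pyRange_one_eq_nil (by norm_num)]
    rfl
  · -- nonempty list: A's loop = fold over runsG 0, B's scan also produces runsG 0
    have hA : bestSeat seats = ((runsG seats 0 seats.length).foldl stepR (-1, 0)).1 :=
      loopA_eq_fold seats seats.length 0 (by omega) (by omega) (-1) 0 (by omega)
    have hB := rle_eq_runsG seats seats.length 1 0 [] (by omega) (by omega) (by omega)
    have hruns0 : runsG seats 0 seats.length =
        (if bestSeatInner seats 1 seats.length - 0 - 1 ≠ 0 then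
          [(((0 + 1 : Nat) : Int),
            ((bestSeatInner seats 1 seats.length - 0 - 1 : Nat) : Int))] else [])
          ++ runsG seats (bestSeatInner seats 1 seats.length) seats.length := by
      conv_lhs =>
        rw [show seats.length = (seats.length - 1) + 1 by omega]
      rw [runsG]
      rw [if_pos (by omega)]
      have hge := bestSeatInner_ge seats 1 seats.length
      have hle1 := bestSeatInner_le seats 1 seats.length (by omega)
      simp only [Nat.zero_add]
      congr 1
      exact runsG_fuel seats (seats.length - 1) seats.length
        (bestSeatInner seats 1 seats.length) (by omega) (by omega)
    -- assemble
    unfold bestSeat_alt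
    simp only [PySem.List.len_eq]
    simp only [Nat.cast_zero, Nat.cast_one] at hB
    rw [hB, hA, hruns0]
    simp only [List.nil_append, Nat.zero_add, Nat.sub_zero]
    rw [min?_eq_foldl]
    have hpos := runsG_pos seats seats.length (bestSeatInner seats 1 seats.length)
    have hge := bestSeatInner_ge seats 1 seats.length
    by_cases hg : bestSeatInner seats 1 seats.length - 1 ≠ 0
    · rw [if_pos hg]
      simp only [List.cons_append, List.nil_append, List.foldl_cons]
      set q : Int × Int := (((1 : Nat) : Int), ((bestSeatInner seats 1 seats.length - 1 : Nat) : Int)) with hqdef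
      have hq2 : (1 : Int) ≤ q.2 := by
        rw [hqdef]
        simp only []
        omega
      have hstep1 : stepR (-1, 0) q = (midOf q.1 q.2, q.2) := by
        unfold stepR
        rw [if_pos (by omega)]
      rw [hstep1]
      rw [show minStep none q = some q from rfl]
      rw [fold_stepR_eq_min _ q hq2 (fun p hp => (hpos p hp).2)]
      cases hm : (runsG seats (bestSeatInner seats 1 seats.length) seats.length).foldl minStep (some q) with
      | none => rfl
      | some m => rfl
    · rw [if_neg hg]
      simp only [List.nil_append]
      cases hruns : runsG seats (bestSeatInner seats 1 seats.length) seats.length with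
      | nil => rfl
      | cons q t =>
        simp only [List.foldl_cons]
        have hq := hpos q (by rw [hruns]; simp)
        have hstep1 : stepR (-1, 0) q = (midOf q.1 q.2, q.2) := by
          unfold stepR
          rw [if_pos (by omega)]
        rw [hstep1]
        rw [show minStep none q = some q from rfl]
        rw [fold_stepR_eq_min t q hq.2 (fun p hp => (hpos p (by rw [hruns]; simp [hp])).2)]
        cases t.foldl minStep (some q) with
        | none => rfl
        | some m => rfl
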